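-- pv_equiv track=rewrite | github.com/tulasiniharika2004/codemind-python | Reverse_Integer.py | rev_singed
-- ===== SOURCE A (Python) =====
-- def rev_singed(n):
--     s=0
--     sign=1
--     if(n<0):
--         sign=-1
--         n=n*-1
--     while n>0:
--         r=n%10
--         s=s*10+r
--         n=n//10
--     if not -214783648<s<214783647:
--         return 0
--     return sign*s
-- ===== SOURCE B (Python) =====
-- def rev_singed(n):
--     s = int(str(abs(n))[::-1])
--     if not -214783648 < s < 214783647:
--         return 0
--     return (-1 if n < 0 else 1) * s
-- ===== Notes on version B (the rewrite author's own statement) =====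
-- stated objective: idiomatic
-- what changed: Replaces the arithmetic mod/div digit loop by string reversal: reverse str(abs(n)) with slicing and parse it back with int(), keeping the original overflow guard and sign handling verbatim.
import Mathlib
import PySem

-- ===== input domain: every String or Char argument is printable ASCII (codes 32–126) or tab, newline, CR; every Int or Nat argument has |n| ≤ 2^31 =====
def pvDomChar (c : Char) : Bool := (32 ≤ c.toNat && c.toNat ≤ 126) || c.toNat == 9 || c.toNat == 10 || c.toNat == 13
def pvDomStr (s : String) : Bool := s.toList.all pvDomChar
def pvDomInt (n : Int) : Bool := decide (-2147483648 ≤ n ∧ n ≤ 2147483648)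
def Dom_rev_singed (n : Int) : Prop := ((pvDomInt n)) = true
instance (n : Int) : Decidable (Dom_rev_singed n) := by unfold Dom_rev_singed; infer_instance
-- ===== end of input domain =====

-- B reverses the digits by string slicing + int() instead of A's mod/div loop (idiomatic; same cost).

-- ===== PORT A =====
-- the while loop of A, state (n, s)
def revLoopA (n s : Int) : Int :=
  if _h : n > 0 then revLoopA (PySem.Int.floordiv n 10) (s * 10 + PySem.Int.mod n 10) else s
termination_by n.toNat
decreasing_by
  rw [PySem.Int.floordiv_eq_ediv_of_pos (by norm_num)]
  omega

def rev_singed (n : Int) : Int :=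
  let sign : Int := if n < 0 then -1 else 1
  let n1 : Int := if n < 0 then n * -1 else n
  let s : Int := revLoopA n1 0
  if ¬((-214783648 : Int) < s ∧ s < 214783647) then 0 else sign * s

-- ===== PORT B =====
-- int() in Source B: its argument here is always the nonempty all-digit string str(abs(n))[::-1],
-- on which int() is exactly the plain decimal left fold below.
def parseDigits (cs : List Char) : Int :=
  cs.foldl (fun a c => a * 10 + ((c.toNat : Int) - 48)) 0

def rev_singed_alt (n : Int) : Int :=
  let s : Int := parseDigits ((PySem.List.slice? (PySem.Int.toChars |n|) none none (-1)).getD [])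
  if ¬((-214783648 : Int) < s ∧ s < 214783647) then 0
  else (if n < 0 then (-1 : Int) else 1) * s

-- ===== PRECONDITION & SPEC =====
def Spec_rev_singed (n : Int) (out : Int) : Prop := out = rev_singed_alt n
instance (n : Int) (out : Int) : Decidable (Spec_rev_singed n out) := by unfold Spec_rev_singed; infer_instance

-- ===== CLAIM (what is proved, stated in full; the proofs are below) =====
def Claim_equal_rev_singed : Prop := ∀ (n : Int), Dom_rev_singed n → Spec_rev_singed n (rev_singed n)

-- ===== LEMMAS AND PROOFS =====

lemma revLoopA_digits (m : Nat) : ∀ s : Int,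
    revLoopA (m : Int) s = (Nat.digits 10 m).foldl (fun (a : Int) (d : Nat) => a * 10 + (d : Int)) s := by
  induction m using Nat.strong_induction_on with
  | _ m ih =>
    intro s
    rw [revLoopA]
    by_cases hm : 0 < m
    · rw [dif_pos (by exact_mod_cast hm)]
      rw [show PySem.Int.floordiv (m : Int) 10 = ((m / 10 : Nat) : Int) from by
            exact_mod_cast PySem.Int.floordiv_natCast m 10]
      rw [show PySem.Int.mod (m : Int) 10 = ((m % 10 : Nat) : Int) from by
            exact_mod_cast PySem.Int.mod_natCast m 10]
      rw [ih (m / 10) (Nat.div_lt_self hm (by norm_num))]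
      rw [Nat.digits_def' (by norm_num : 1 < 10) hm]
      simp
    · have hm0 : m = 0 := by omega
      subst hm0
      simp

lemma tdc_eq (fuel : Nat) : ∀ (n : Nat) (acc : List Char), n < fuel →
    Nat.toDigitsCore 10 fuel n acc =
      (if n = 0 then ['0'] else ((Nat.digits 10 n).map Nat.digitChar).reverse) ++ acc := by
  induction fuel with
  | zero => intro n acc h; omega
  | succ fuel ih =>
    intro n acc h
    simp only [Nat.toDigitsCore]
    by_cases hd : n / 10 = 0
    · rw [if_pos hd]
      by_cases hn : n = 0
      · subst hn; simp; rfl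
      · rw [if_neg hn]
        have hlt : n < 10 := by omega
        rw [Nat.digits_def' (by norm_num : 1 < 10) (by omega), hd]
        simp [Nat.mod_eq_of_lt hlt]
    · rw [if_neg hd]
      rw [ih (n / 10) (Nat.digitChar (n % 10) :: acc) (by omega)]
      rw [if_neg hd, if_neg (by omega : ¬ n = 0)]
      rw [show Nat.digits 10 n = n % 10 :: Nat.digits 10 (n / 10) from
            Nat.digits_def' (by norm_num : 1 < 10) (by omega)]
      simp only [List.map_cons, List.reverse_cons, List.append_assoc, List.cons_append,
        List.nil_append]

lemma toChars_natCast (m : Nat) : PySem.Int.toChars (m : Int) = Nat.toDigits 10 m := by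
  simp [PySem.Int.toChars]

lemma digitChar_toNat (d : Nat) (h : d < 10) : (Nat.digitChar d).toNat = 48 + d := by
  interval_cases d <;> rfl

lemma parse_rev (m : Nat) :
    parseDigits ((Nat.toDigits 10 m).reverse) =
      (Nat.digits 10 m).foldl (fun (a : Int) (d : Nat) => a * 10 + (d : Int)) 0 := by
  rw [Nat.toDigits, tdc_eq (m + 1) m [] (by omega)]
  by_cases h : m = 0
  · subst h; simp [parseDigits]
  · rw [if_neg h]
    simp only [List.append_nil, List.reverse_reverse]
    rw [parseDigits, List.foldl_map]
    apply PySem.List.foldl_congr_mem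
    intro a d hd
    rw [digitChar_toNat d (Nat.digits_lt_base (by norm_num) hd)]
    push_cast
    ring

lemma s_eq (m : Nat) :
    parseDigits ((PySem.List.slice? (PySem.Int.toChars (m : Int)) none none (-1)).getD []) =
      revLoopA (m : Int) 0 := by
  rw [PySem.List.slice?_none_none_neg_one]
  simp only [Option.getD_some]
  rw [toChars_natCast, parse_rev, revLoopA_digits]

-- ===== VERDICT (by name: the statement is the Claim_ definition above) =====
theorem rev_singed_spec : Claim_equal_rev_singed := by
  intro n _
  unfold Spec_rev_singed
  show rev_singed n = rev_singed_alt n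
  unfold rev_singed rev_singed_alt
  by_cases hn : n < 0
  · have h1 : n * -1 = (((-n).toNat : Nat) : Int) := by omega
    have h2 : |n| = (((-n).toNat : Nat) : Int) := by rw [abs_of_neg hn]; omega
    simp only [if_pos hn, h1, h2, s_eq]
  · have h1 : n = ((n.toNat : Nat) : Int) := by omega
    have h2 : |n| = ((n.toNat : Nat) : Int) := by rw [abs_of_nonneg (by omega : (0:Int) ≤ n)]; omega
    simp only [if_neg hn, h2]
    rw [s_eq, ← h1]
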